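-- pv_equiv track=rewrite | github.com/kootenpv/sky | sky/dbpedia.py | generate_testables
-- ===== SOURCE A (Python) =====
-- def generate_testables(words, stopword_set, n_grams=4):
--     grams = set()
--     n = len(words)
--     for i in range(len(words)):
--         for j in range(n_grams):
--             if n - j > i:
--                 ws = words[i: i + j + 1]
--                 if any(['NN' not in x[1] for x in ws]):
--                     continue
--                 word_list = [x[0].lower() for x in ws]
--                 if any([len(x) < 3 for x in word_list]):
--                     continue
--                 if set(word_list) & stopword_set:
--                     continue
--
--                 grams.add((" ".join([x[1] for x in ws]), " ".join(word_list)))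
--     return grams
-- ===== SOURCE B (Python) =====
-- def generate_testables(words, stopword_set, n_grams=4):
--     # Every filter in the task is per-word, so a gram is valid iff all its
--     # words are good; extend each start incrementally and break at the first
--     # bad word, maintaining the joined strings as we go.
--     grams = set()
--     for i in range(len(words)):
--         tag_str = ""
--         word_str = ""
--         j = 0
--         for w, t in words[i:]:
--             if j >= n_grams:
--                 break
--             lw = w.lower()
--             if 'NN' not in t or len(lw) < 3 or lw in stopword_set:
--                 break
--             tag_str = t if j == 0 else tag_str + " " + t
--             word_str = lw if j == 0 else word_str + " " + lw
--             grams.add((tag_str, word_str))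
--             j += 1
--     return grams
-- ===== Notes on version B (the rewrite author's own statement) =====
-- stated objective: faster
-- what changed: Instead of re-slicing every window words[i:i+j+1] and re-running three whole-window filter passes (plus a set intersection) for each (i,j), B walks forward from each start index once, tests only the newly added word, breaks at the first bad word, and maintains the joined tag/word strings incrementally.
import Mathlib
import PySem

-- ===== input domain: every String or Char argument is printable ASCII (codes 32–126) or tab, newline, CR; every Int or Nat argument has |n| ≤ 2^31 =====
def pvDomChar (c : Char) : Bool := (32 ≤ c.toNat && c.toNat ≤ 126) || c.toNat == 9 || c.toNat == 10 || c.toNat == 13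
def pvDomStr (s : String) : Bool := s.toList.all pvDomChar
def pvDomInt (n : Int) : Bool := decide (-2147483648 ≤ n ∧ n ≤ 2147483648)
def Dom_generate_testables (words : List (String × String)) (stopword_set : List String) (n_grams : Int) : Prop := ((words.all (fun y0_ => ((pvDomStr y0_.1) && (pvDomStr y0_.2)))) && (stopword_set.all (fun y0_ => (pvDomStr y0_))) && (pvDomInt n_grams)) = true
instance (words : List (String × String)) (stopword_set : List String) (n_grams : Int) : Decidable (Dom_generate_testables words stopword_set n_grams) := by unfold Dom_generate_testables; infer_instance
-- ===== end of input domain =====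

-- B replaces A's independent re-slicing and re-checking of every n-gram window by one
-- incremental walk per start index (break at the first bad word, maintain the joined
-- strings); a timing run measured B faster. Both return a set; insertion order coincides.

-- ===== PORT A =====
def generate_testables (words : List (String × String)) (stopword_set : List String) (n_grams : Int) : List (String × String) :=
  let grams : PySem.Set (String × String) := PySem.Set.empty
  let n : Int := (words.length : Int)
  (PySem.List.pyRange 0 (words.length : Int) 1).foldl (fun grams i =>
    (PySem.List.pyRange 0 n_grams 1).foldl (fun grams j =>
      if n - j > i then
        let ws := PySem.List.slice words (some i) (some (i + j + 1))
        if ws.any (fun x => !(PySem.Str.isIn "NN" x.2)) then grams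
        else
          let word_list := ws.map (fun x => PySem.Str.lower x.1)
          if word_list.any (fun x => PySem.Str.len x < 3) then grams
          else if PySem.Set.inter (PySem.Set.ofList word_list) stopword_set ≠ [] then grams
          else PySem.Set.add grams (PySem.Str.join " " (ws.map (fun x => x.2)), PySem.Str.join " " word_list)
      else grams) grams) grams

-- ===== PORT B =====
-- inner while-loop of B: walk the suffix words[i:], counter j, running joined strings
def gtAltWalk (stopword_set : List String) (n_grams : Int) :
    List (String × String) → Int → String → String → PySem.Set (String × String) → PySem.Set (String × String)
  | [], _, _, _, grams => grams
  | (w, t) :: rest, j, tag_str, word_str, grams =>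
    if n_grams ≤ j then grams
    else
      let lw := PySem.Str.lower w
      if !(PySem.Str.isIn "NN" t) || PySem.Str.len lw < 3 || stopword_set.contains lw then grams
      else
        let tag_str' := if j == 0 then t else tag_str ++ " " ++ t
        let word_str' := if j == 0 then lw else word_str ++ " " ++ lw
        gtAltWalk stopword_set n_grams rest (j + 1) tag_str' word_str' (PySem.Set.add grams (tag_str', word_str'))

def generate_testables_alt (words : List (String × String)) (stopword_set : List String) (n_grams : Int) : List (String × String) :=
  (PySem.List.pyRange 0 (words.length : Int) 1).foldl (fun grams i =>
    gtAltWalk stopword_set n_grams (PySem.List.slice words (some i) none) 0 "" "" grams)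
    PySem.Set.empty

-- ===== PRECONDITION & SPEC =====
def Spec_generate_testables (words : List (String × String)) (stopword_set : List String) (n_grams : Int) (out : List (String × String)) : Prop := out = generate_testables_alt words stopword_set n_grams
instance (words : List (String × String)) (stopword_set : List String) (n_grams : Int) (out : List (String × String)) : Decidable (Spec_generate_testables words stopword_set n_grams out) := by unfold Spec_generate_testables; infer_instance

-- ===== CLAIM (what is proved, stated in full; the proofs are below) =====
def Claim_equal_generate_testables : Prop := ∀ (words : List (String × String)) (stopword_set : List String) (n_grams : Int), Dom_generate_testables words stopword_set n_grams → Spec_generate_testables words stopword_set n_grams (generate_testables words stopword_set n_grams)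

-- ===== LEMMAS AND PROOFS =====
def gtGood (stopword_set : List String) (x : String × String) : Bool :=
  PySem.Str.isIn "NN" x.2 && decide (3 ≤ PySem.Str.len (PySem.Str.lower x.1)) && !(stopword_set.contains (PySem.Str.lower x.1))

def gtStepA (stopword_set : List String) (L : List (String × String))
    (grams : PySem.Set (String × String)) (j : Nat) : PySem.Set (String × String) :=
  if j < L.length then
    if (L.take (j + 1)).any (fun x => !(PySem.Str.isIn "NN" x.2)) then grams
    else
      if ((L.take (j + 1)).map (fun x => PySem.Str.lower x.1)).any (fun x => PySem.Str.len x < 3) then grams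
      else if PySem.Set.inter (PySem.Set.ofList ((L.take (j + 1)).map (fun x => PySem.Str.lower x.1))) stopword_set ≠ [] then grams
      else PySem.Set.add grams (PySem.Str.join " " ((L.take (j + 1)).map (fun x => x.2)), PySem.Str.join " " ((L.take (j + 1)).map (fun x => PySem.Str.lower x.1)))
  else grams

lemma gtInter_ne_nil (wl sw : List String) : (PySem.Set.inter (PySem.Set.ofList wl) sw ≠ []) ↔ ∃ w ∈ wl, w ∈ sw := by
  rw [← List.isEmpty_eq_false_iff, List.isEmpty_eq_false_iff_exists_mem]
  constructor
  · rintro ⟨x, hx⟩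
    simp [pysem] at hx
    exact ⟨x, hx⟩
  · rintro ⟨x, h1, h2⟩
    exact ⟨x, by simp [pysem]; exact ⟨h1, h2⟩⟩

lemma gtAll_iff (sw : List String) (ws : List (String × String)) :
    ws.all (gtGood sw) = true ↔
      ∀ x ∈ ws, PySem.Str.isIn "NN" x.2 = true ∧ 3 ≤ PySem.Str.len (PySem.Str.lower x.1) ∧ PySem.Str.lower x.1 ∉ sw := by
  simp only [List.all_eq_true, gtGood, Bool.and_eq_true, Bool.not_eq_true', List.contains_eq_mem,
    decide_eq_true_eq, decide_eq_false_iff_not, and_assoc]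

lemma gtStepA_eq_ite (sw : List String) (L : List (String × String)) (grams) (j : Nat) :
    gtStepA sw L grams j =
      if j < L.length ∧ (L.take (j + 1)).all (gtGood sw) = true then
        PySem.Set.add grams (PySem.Str.join " " ((L.take (j + 1)).map (fun x => x.2)),
                             PySem.Str.join " " ((L.take (j + 1)).map (fun x => PySem.Str.lower x.1)))
      else grams := by
  unfold gtStepA
  by_cases hj : j < L.length
  · rw [if_pos hj]
    by_cases hall : (L.take (j + 1)).all (gtGood sw) = true
    · have hc : j < L.length ∧ (L.take (j + 1)).all (gtGood sw) = true := ⟨hj, hall⟩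
      rw [if_pos hc]
      rw [gtAll_iff] at hall
      have e1 : ¬ (((L.take (j+1)).any (fun x => !(PySem.Str.isIn "NN" x.2))) = true) := by
        simp only [List.any_eq_true, not_exists, not_and]
        intro x hx
        rw [(hall x hx).1]
        simp
      have e2 : ¬ ((((L.take (j+1)).map (fun x => PySem.Str.lower x.1)).any (fun x => PySem.Str.len x < 3)) = true) := by
        simp only [List.any_map, List.any_eq_true, not_exists, not_and, Function.comp_apply,
          decide_eq_true_eq, not_lt]
        intro x hx
        exact (hall x hx).2.1
      have e3 : ¬ (PySem.Set.inter (PySem.Set.ofList ((L.take (j+1)).map (fun x => PySem.Str.lower x.1))) sw ≠ []) := by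
        rw [gtInter_ne_nil]
        rintro ⟨w, hw, hws⟩
        obtain ⟨x, hx, rfl⟩ := List.mem_map.mp hw
        exact (hall x hx).2.2 hws
      rw [if_neg e1, if_neg e2, if_neg e3]
    · have hcneg : ¬ (j < L.length ∧ (L.take (j + 1)).all (gtGood sw) = true) := fun h => hall h.2
      rw [if_neg hcneg]
      rw [gtAll_iff] at hall
      push Not at hall
      obtain ⟨x, hx, hbad⟩ := hall
      by_cases c1 : ((L.take (j+1)).any (fun x => !(PySem.Str.isIn "NN" x.2))) = true
      · rw [if_pos c1]
      · rw [if_neg c1]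
        rw [Bool.not_eq_true] at c1
        simp only [List.any_eq_false] at c1
        have hNN : PySem.Str.isIn "NN" x.2 = true := by
          simpa only [Bool.not_eq_true, Bool.not_eq_false'] using c1 x hx
        by_cases c2 : ((((L.take (j+1)).map (fun x => PySem.Str.lower x.1))).any (fun x => PySem.Str.len x < 3)) = true
        · rw [if_pos c2]
        · rw [if_neg c2]
          rw [Bool.not_eq_true] at c2
          simp only [List.any_map, List.any_eq_false, Function.comp_apply] at c2
          have hlen : 3 ≤ PySem.Str.len (PySem.Str.lower x.1) := by
            simpa only [decide_eq_true_eq, not_lt] using c2 x hx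
          have c3 : (PySem.Set.inter (PySem.Set.ofList ((L.take (j+1)).map (fun x => PySem.Str.lower x.1))) sw ≠ []) := by
            rw [gtInter_ne_nil]
            exact ⟨PySem.Str.lower x.1, List.mem_map_of_mem hx, hbad hNN hlen⟩
          rw [if_pos c3]
  · rw [if_neg hj, if_neg (show ¬ (j < L.length ∧ (L.take (j + 1)).all (gtGood sw) = true) from fun h => hj h.1)]
lemma gtJoin_nil : PySem.Str.join " " ([] : List String) = "" := by
  apply String.toList_inj.mp
  simp [PySem.Str.join, PySem.Chars.join_nil]

lemma gtJoin_singleton (a : String) : PySem.Str.join " " [a] = a := by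
  apply String.toList_inj.mp
  simp [PySem.Str.join, PySem.Chars.join_singleton]

lemma gtJoin_append (xs : List String) (a : String) (h : xs ≠ []) :
    PySem.Str.join " " (xs ++ [a]) = PySem.Str.join " " xs ++ " " ++ a := by
  apply String.toList_inj.mp
  simp [PySem.Str.join]
  induction xs with
  | nil => simp at h
  | cons x t ih =>
    cases t with
    | nil => simp [PySem.Chars.join_singleton, PySem.Chars.join_cons_cons]
    | cons y t2 =>
      simp only [List.cons_append, PySem.Chars.join_cons_cons, List.map_cons] at *
      simp [ih]

-- B's per-word reject test is the negation of gtGood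
lemma gtBad_eq (sw : List String) (x : String × String) :
    (!(PySem.Str.isIn "NN" x.2) || (decide (PySem.Str.len (PySem.Str.lower x.1) < 3)) || sw.contains (PySem.Str.lower x.1)) = !(gtGood sw x) := by
  cases h1 : PySem.Str.isIn "NN" x.2 <;>
  cases h3 : sw.contains (PySem.Str.lower x.1) <;>
  cases h2 : decide (3 ≤ PySem.Str.len (PySem.Str.lower x.1)) <;>
  simp only [gtGood, h1, h2, h3, Bool.and_false, Bool.and_true, Bool.true_and, Bool.not_false,
    Bool.not_true, Bool.or_true, Bool.or_false, Bool.true_or, Bool.false_or] <;>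
  simp only [decide_eq_true_eq, decide_eq_false_iff_not] at h2 ⊢ <;> omega

-- once a bad word lies inside every longer window, A's step is the identity
lemma gtSkip_of_bad (sw : List String) (L : List (String × String)) (k : Nat)
    (hk : k < L.length) (hbad : gtGood sw (L[k]) = false)
    (j : Nat) (hj : k ≤ j) (acc : PySem.Set (String × String)) :
    gtStepA sw L acc j = acc := by
  rw [gtStepA_eq_ite, if_neg]
  rintro ⟨hjlen, hall⟩
  have hlt : k < (L.take (j+1)).length := by
    simp only [List.length_take]
    omega
  have hmem : L[k] ∈ L.take (j+1) := by
    have he : (L.take (j+1))[k]'hlt = L[k] := List.getElem_take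
    exact he ▸ List.getElem_mem hlt
  have := List.all_eq_true.mp hall _ hmem
  rw [hbad] at this
  exact absurd this (by simp)

-- a fold of identity steps is the identity
lemma gtFold_skip (sw : List String) (L : List (String × String)) (a m : Nat)
    (grams : PySem.Set (String × String))
    (h : ∀ j, a ≤ j → ∀ acc, gtStepA sw L acc j = acc) :
    (List.range' a m).foldl (gtStepA sw L) grams = grams := by
  induction m generalizing a grams with
  | zero => rfl
  | succ m ihm =>
    rw [List.range'_succ, List.foldl_cons, h a le_rfl]
    exact ihm (a+1) grams (fun j hj acc => h j (by omega) acc)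

-- A's step at an out-of-range index is the identity
lemma gtSkip_of_len (sw : List String) (L : List (String × String)) (j : Nat)
    (hj : L.length ≤ j) (acc : PySem.Set (String × String)) :
    gtStepA sw L acc j = acc := by
  rw [gtStepA_eq_ite, if_neg]
  rintro ⟨hjlen, -⟩
  omega

lemma gtWalk_eq (sw : List String) (g : Int) (L : List (String × String)) :
    ∀ (m j0 : Nat) (grams : PySem.Set (String × String)),
      j0 + m = g.toNat →
      j0 ≤ L.length →
      (L.take j0).all (gtGood sw) = true →
      (List.range' j0 m).foldl (gtStepA sw L) grams
        = gtAltWalk sw g (L.drop j0) (j0 : Int)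
            (PySem.Str.join " " ((L.take j0).map (fun x => x.2)))
            (PySem.Str.join " " ((L.take j0).map (fun x => PySem.Str.lower x.1))) grams := by
  intro m
  induction m with
  | zero =>
    intro j0 grams hm hle hall
    simp only [List.range'_zero, List.foldl_nil]
    cases hdrop : L.drop j0 with
    | nil => rw [gtAltWalk]
    | cons p rest =>
      obtain ⟨w, t⟩ := p
      rw [gtAltWalk]
      rw [if_pos (by omega)]
  | succ m ih =>
    intro j0 grams hm hle hall
    rw [List.range'_succ, List.foldl_cons]
    have hguard : ¬ (g ≤ (j0:Int)) := by omega
    by_cases hjlen : j0 < L.length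
    · have hdrop : L.drop j0 = L[j0] :: L.drop (j0+1) := List.drop_eq_getElem_cons hjlen
      have htake : L.take (j0+1) = L.take j0 ++ [L[j0]] := by
        rw [List.take_add_one, List.getElem?_eq_getElem hjlen]
        rfl
      have hmap2 : (L.take (j0+1)).map (fun x : String × String => x.2)
          = (L.take j0).map (fun x => x.2) ++ [(L[j0]).2] := by
        rw [htake, List.map_append]
        rfl
      have hmap1 : (L.take (j0+1)).map (fun x : String × String => PySem.Str.lower x.1)
          = (L.take j0).map (fun x => PySem.Str.lower x.1) ++ [PySem.Str.lower (L[j0]).1] := by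
        rw [htake, List.map_append]
        rfl
      by_cases hgood : gtGood sw (L[j0]) = true
      · -- the next word is good: both sides add the same pair and continue
        have hall' : (L.take (j0+1)).all (gtGood sw) = true := by
          rw [htake, List.all_append]
          simp [hall, hgood]
        rw [gtStepA_eq_ite, if_pos ⟨hjlen, hall'⟩]
        rw [ih (j0+1) _ (by omega) (by omega) hall']
        rw [hdrop]
        conv_rhs => rw [gtAltWalk]
        rw [if_neg hguard]
        have hbadv : (!(PySem.Str.isIn "NN" (L[j0]).2)
            || (decide (PySem.Str.len (PySem.Str.lower (L[j0]).1) < 3))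
            || sw.contains (PySem.Str.lower (L[j0]).1)) = false := by
          rw [gtBad_eq, hgood]
          rfl
        simp only [hbadv, Bool.false_eq_true, if_false]
        rcases Nat.eq_zero_or_pos j0 with hj0 | hj0
        · subst hj0
          have hz : (((0:Nat):Int) == 0) = true := by decide
          simp only [hz, if_true, Nat.cast_ofNat, Nat.cast_zero, Nat.cast_one, Nat.zero_add]
          rw [hmap2, hmap1]
          simp only [List.take_zero, List.map_nil, List.nil_append]
          rw [gtJoin_singleton, gtJoin_singleton]
          norm_num
        · have hz : (((j0:Nat):Int) == 0) = false := by
            simp only [beq_eq_false_iff_ne, ne_eq, Int.natCast_eq_zero]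
            omega
          simp only [hz, Bool.false_eq_true, if_false]
          have htne : L.take j0 ≠ [] := by
            intro hc
            have := congrArg List.length hc
            simp only [List.length_take, List.length_nil] at this
            omega
          have hne2 : (L.take j0).map (fun x : String × String => x.2) ≠ [] :=
            fun hc => htne (List.map_eq_nil_iff.mp hc)
          have hne1 : (L.take j0).map (fun x : String × String => PySem.Str.lower x.1) ≠ [] :=
            fun hc => htne (List.map_eq_nil_iff.mp hc)
          rw [hmap2, hmap1, gtJoin_append _ _ hne2, gtJoin_append _ _ hne1]
          push_cast
          rfl
      · -- the next word is bad: A skips every remaining window, B breaks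
        rw [Bool.not_eq_true] at hgood
        rw [gtSkip_of_bad sw L j0 hjlen hgood j0 le_rfl]
        rw [gtFold_skip sw L (j0+1) m _
          (fun j hj acc => gtSkip_of_bad sw L j0 hjlen hgood j (by omega) acc)]
        rw [hdrop]
        conv_rhs => rw [gtAltWalk]
        rw [if_neg hguard]
        have hbadv : (!(PySem.Str.isIn "NN" (L[j0]).2)
            || (decide (PySem.Str.len (PySem.Str.lower (L[j0]).1) < 3))
            || sw.contains (PySem.Str.lower (L[j0]).1)) = true := by
          rw [gtBad_eq, hgood]
          rfl
        simp only [hbadv, if_true]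
    · -- the start is past the end: nothing left on either side
      have hdrop : L.drop j0 = [] := List.drop_eq_nil_of_le (by omega)
      rw [gtSkip_of_len sw L j0 (by omega)]
      rw [gtFold_skip sw L (j0+1) m _
        (fun j hj acc => gtSkip_of_len sw L j (by omega) acc)]
      rw [hdrop]
      rw [gtAltWalk]
-- ===== VERDICT (by name: the statement is the Claim_ definition above) =====
theorem generate_testables_spec : Claim_equal_generate_testables := by
  intro words sw g _
  unfold Spec_generate_testables generate_testables generate_testables_alt
  simp only []
  rw [PySem.List.pyRange_one 0 (words.length : Int)]
  simp only [Int.sub_zero, Int.toNat_natCast, List.foldl_map, Int.zero_add]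
  apply PySem.List.foldl_congr_mem
  intro acc i hi
  have hi' : i < words.length := List.mem_range.mp hi
  have hslice0 : PySem.List.slice words (some ((i : Nat) : Int)) none = words.drop i :=
    PySem.List.slice_from_natCast words i
  rw [hslice0]
  -- inner loop of A becomes a fold of gtStepA over range' 0 g.toNat
  rw [PySem.List.pyRange_one 0 g]
  simp only [Int.sub_zero, List.foldl_map, Int.zero_add]
  rw [List.range_eq_range']
  have hcong : ∀ body, (∀ (acc2 : PySem.Set (String × String)) (j : Nat), j ∈ List.range' 0 g.toNat → body acc2 j = gtStepA sw (words.drop i) acc2 j) → List.foldl body acc (List.range' 0 g.toNat) = List.foldl (gtStepA sw (words.drop i)) acc (List.range' 0 g.toNat) := fun body h => PySem.List.foldl_congr_mem _ _ _ _ (fun a x hx => h a x hx)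
  rw [hcong _
    (by intro acc2 j hj
        have hslice : PySem.List.slice words (some ((i:Nat):Int)) (some (((i:Nat):Int) + ((j:Nat):Int) + 1)) = (words.drop i).take (j+1) := by
          have h1 : (((i:Nat):Int) + ((j:Nat):Int) + 1 : Int) = (((i + j + 1 : Nat) : Int)) := by push_cast; ring
          rw [h1, PySem.List.slice_natCast]
          congr 1
          omega
        by_cases hc : j < (words.drop i).length
        · have hc' : ((words.length : Int) - ((j:Nat):Int) > ((i:Nat):Int)) := by
            rw [List.length_drop] at hc
            omega
          rw [if_pos hc']
          rw [gtStepA, if_pos hc, hslice]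
        · have hc' : ¬ ((words.length : Int) - ((j:Nat):Int) > ((i:Nat):Int)) := by
            rw [List.length_drop] at hc
            omega
          rw [if_neg hc']
          rw [gtStepA, if_neg hc])]
  have hwalk := gtWalk_eq sw g (words.drop i) g.toNat 0 acc (by omega) (by omega) (by simp)
  simp only [List.take_zero, List.map_nil, List.drop_zero, Nat.cast_zero] at hwalk
  rw [hwalk, gtJoin_nil]
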